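-- pv_equiv track=rewrite | github.com/klienha/Python-Programming-Projects | Repetition_For_and_While_Loops.py | how_many_uruks
-- ===== SOURCE A (Python) =====
-- def how_many_uruks(strength_values, init_fund_needed):
--     budget = 0
--
--     for val in strength_values:
--         if val == 0:
--             continue
--         elif val % 2 == 0:
--             budget *= val
--         else:
--             budget += val
--
--     num_uruk = 0
--     while True:
--         if (budget - init_fund_needed) < 0:
--             break
--
--         budget = budget - init_fund_needed
--         init_fund_needed += 1
--         num_uruk += 1
--
--     return num_uruk
-- ===== SOURCE B (Python) =====
-- def how_many_uruks(strength_values, init_fund_needed):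
--     budget = 0
--     for v in strength_values:
--         if v:
--             if v % 2:
--                 budget += v
--             else:
--                 budget *= v
--     f = init_fund_needed
--
--     # spending k uruks costs f + (f+1) + ... + (f+k-1); the loop stops at the
--     # least k with (k+1)*(2*f+k) - 2*budget > 0: binary search that threshold.
--     def q(k):
--         return (k + 1) * (2 * f + k) - 2 * budget
--
--     if q(0) > 0:
--         return 0
--     lo = 0
--     hi = 2 * abs(budget) + 2 * abs(f) + 2   # q(hi) > 0 always
--     while hi - lo > 1:
--         mid = (lo + hi) // 2
--         if q(mid) > 0:
--             hi = mid
--         else: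
--             lo = mid
--     return hi
-- ===== Notes on version B (the rewrite author's own statement) =====
-- stated objective: alternative
-- what changed: A buys uruks one at a time, subtracting the growing price from the budget until the break fires; B notes that buying k uruks costs the arithmetic series f+(f+1)+...+(f+k-1) and binary-searches the least k whose cost exceeds the budget (in practice both runtimes are dominated by the budget-aggregation pass, whose product can make the budget astronomically large, so no speed-up was measured).
import Mathlib
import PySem

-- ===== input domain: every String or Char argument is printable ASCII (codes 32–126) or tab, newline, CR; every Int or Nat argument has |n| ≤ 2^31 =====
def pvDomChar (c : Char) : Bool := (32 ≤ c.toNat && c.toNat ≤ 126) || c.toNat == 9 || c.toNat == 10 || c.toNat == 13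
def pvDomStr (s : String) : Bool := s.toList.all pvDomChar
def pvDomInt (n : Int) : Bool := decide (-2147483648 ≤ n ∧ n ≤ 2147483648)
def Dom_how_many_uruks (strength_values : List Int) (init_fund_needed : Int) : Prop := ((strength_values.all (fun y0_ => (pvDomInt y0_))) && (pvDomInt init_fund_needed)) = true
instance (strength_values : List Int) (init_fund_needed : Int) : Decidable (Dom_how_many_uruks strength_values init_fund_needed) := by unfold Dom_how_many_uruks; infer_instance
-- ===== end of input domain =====

-- B replaces A's one-by-one purchase loop by a binary search for the least k whose
-- arithmetic-series cost exceeds the budget (alternative algorithm, same return value).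

-- ===== PORT A =====
-- A's first for-loop (aggregate the budget)
def pvBudgetA (l : List Int) (budget : Int) : Int :=
  match l with
  | [] => budget
  | v :: t =>
      if v == 0 then pvBudgetA t budget
      else if PySem.Int.mod v 2 == 0 then pvBudgetA t (budget * v)
      else pvBudgetA t (budget + v)

-- A's while-True loop; num_uruk is the accumulator. fuel is a totality guard only:
-- it starts at a bound (proved in pvQ_big / loopA_char below) on the number of
-- purchases the loop can make before the break fires.
def pvLoopA (budget f num : Int) (fuel : Nat) : Int :=
  match fuel with
  | 0 => num
  | fuel + 1 =>
    if budget - f < 0 then num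
    else pvLoopA (budget - f) (f + 1) (num + 1) fuel

def how_many_uruks (strength_values : List Int) (init_fund_needed : Int) : Int :=
  pvLoopA (pvBudgetA strength_values 0) init_fund_needed 0
    (2 * |pvBudgetA strength_values 0| + 2 * |init_fund_needed| + 2).toNat

-- ===== PORT B =====
-- B's budget loop (truthiness test, odd branch first)
def pvBudgetB (l : List Int) (budget : Int) : Int :=
  match l with
  | [] => budget
  | v :: t =>
      if v ≠ 0 then
        (if PySem.Int.mod v 2 ≠ 0 then pvBudgetB t (budget + v) else pvBudgetB t (budget * v))
      else pvBudgetB t budget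

-- q(k) of Source B: positive exactly when k uruks are no longer affordable
def pvQ (budget f k : Int) : Int := (k + 1) * (2 * f + k) - 2 * budget

-- Source B's binary-search while-loop; fuel is a totality guard only: it starts at the
-- interval width, which bounds the number of iterations (mid = (lo + hi) // 2, inlined)
def pvBisect (budget f lo hi : Int) (fuel : Nat) : Int :=
  match fuel with
  | 0 => hi
  | fuel + 1 =>
    if hi - lo > 1 then
      (if pvQ budget f (PySem.Int.floordiv (lo + hi) 2) > 0 then
        pvBisect budget f lo (PySem.Int.floordiv (lo + hi) 2) fuel
      else
        pvBisect budget f (PySem.Int.floordiv (lo + hi) 2) hi fuel)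
    else hi

def how_many_uruks_alt (strength_values : List Int) (init_fund_needed : Int) : Int :=
  let budget := pvBudgetB strength_values 0
  let f := init_fund_needed
  if pvQ budget f 0 > 0 then 0
  else pvBisect budget f 0 (2 * |budget| + 2 * |f| + 2) (2 * |budget| + 2 * |f| + 2).toNat

-- ===== PRECONDITION & SPEC =====
def Spec_how_many_uruks (strength_values : List Int) (init_fund_needed : Int) (out : Int) : Prop := out = how_many_uruks_alt strength_values init_fund_needed
instance (strength_values : List Int) (init_fund_needed : Int) (out : Int) : Decidable (Spec_how_many_uruks strength_values init_fund_needed out) := by unfold Spec_how_many_uruks; infer_instance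

-- ===== CLAIM (what is proved, stated in full; the proofs are below) =====
def Claim_equal_how_many_uruks : Prop := ∀ (strength_values : List Int) (init_fund_needed : Int), Dom_how_many_uruks strength_values init_fund_needed → Spec_how_many_uruks strength_values init_fund_needed (how_many_uruks strength_values init_fund_needed)

-- ===== LEMMAS AND PROOFS =====

-- the two budget folds agree
theorem budget_eq (l : List Int) (b : Int) : pvBudgetA l b = pvBudgetB l b := by
  induction l generalizing b with
  | nil => rfl
  | cons v t ih =>
      unfold pvBudgetA pvBudgetB
      by_cases h0 : v = 0
      · simp [h0, ih]
      · rcases Int.emod_two_eq v with h2 | h2 <;> simp [h0, h2, ih]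

-- convexity: q nonpositive at 0 and at k forces q nonpositive in between
theorem pvQ_mono (b f j k : Int) (hj : 0 ≤ j) (hjk : j ≤ k)
    (h0 : pvQ b f 0 ≤ 0) (hk : pvQ b f k ≤ 0) : pvQ b f j ≤ 0 := by
  rcases eq_or_lt_of_le hjk with rfl | hlt
  · exact hk
  · have key : k * pvQ b f j =
        (k - j) * pvQ b f 0 + j * pvQ b f k + j * k * (j - k) := by
      unfold pvQ; ring
    have hkpos : 0 < k := lt_of_le_of_lt hj hlt
    have t1 : (k - j) * pvQ b f 0 ≤ 0 := mul_nonpos_of_nonneg_of_nonpos (by omega) h0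
    have t2 : j * pvQ b f k ≤ 0 := mul_nonpos_of_nonneg_of_nonpos hj hk
    have t3 : j * k * (j - k) ≤ 0 :=
      mul_nonpos_of_nonneg_of_nonpos (mul_nonneg hj (le_of_lt hkpos)) (by omega)
    have t4 : k * pvQ b f j ≤ 0 := by linarith
    by_contra hpos
    have hpos2 : 0 < pvQ b f j := by omega
    have := mul_pos hkpos hpos2
    linarith

-- shifting A's loop state shifts q by one
theorem pvQ_shift (b f k : Int) : pvQ (b - f) (f + 1) k = pvQ b f (k + 1) := by
  unfold pvQ; ring

-- characterization of A's loop (fuel large enough that the break is reachable):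
-- its result r satisfies q(r-num) > 0 and q(j) ≤ 0 below
theorem loopA_char (fuel : Nat) : ∀ (b f num : Int),
    (∃ k : Int, 0 ≤ k ∧ k ≤ (fuel : Int) ∧ 0 < pvQ b f k) →
    num ≤ pvLoopA b f num fuel ∧ 0 < pvQ b f (pvLoopA b f num fuel - num) ∧
      ∀ j, 0 ≤ j → j < pvLoopA b f num fuel - num → pvQ b f j ≤ 0 := by
  induction fuel with
  | zero =>
      intro b f num ⟨k, hk0, hkf, hkq⟩
      have hk : k = 0 := by omega
      rw [pvLoopA]
      refine ⟨le_refl _, ?_, ?_⟩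
      · simp only [sub_self]; rw [hk] at hkq; exact hkq
      · intro j hj hj'; omega
  | succ fuel ih =>
      intro b f num ⟨k, hk0, hkf, hkq⟩
      rw [pvLoopA]
      by_cases h : b - f < 0
      · rw [if_pos h]
        refine ⟨le_refl _, ?_, ?_⟩
        · simp only [sub_self]; unfold pvQ; omega
        · intro j hj hj'; omega
      · rw [if_neg h]
        have hq0 : pvQ b f 0 ≤ 0 := by unfold pvQ; omega
        have hk1 : 1 ≤ k := by
          rcases eq_or_lt_of_le hk0 with rfl | _
          · omega
          · omega
        obtain ⟨hle, hpos, hlow⟩ := ih (b - f) (f + 1) (num + 1)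
          ⟨k - 1, by omega, by omega, by rw [pvQ_shift]; simpa using hkq⟩
        refine ⟨by omega, ?_, ?_⟩
        · have : pvLoopA (b - f) (f + 1) (num + 1) fuel - num
              = (pvLoopA (b - f) (f + 1) (num + 1) fuel - (num + 1)) + 1 := by ring
          rw [this, ← pvQ_shift]; exact hpos
        · intro j hj hj'
          rcases eq_or_lt_of_le hj with rfl | hj1
          · exact hq0
          · have : pvQ b f j = pvQ (b - f) (f + 1) (j - 1) := by rw [pvQ_shift]; ring_nf
            rw [this]
            exact hlow (j - 1) (by omega) (by omega)

-- characterization of B's bisection under the loop invariant (fuel covers the interval)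
theorem bisect_char (b f : Int) : ∀ (fuel : Nat) (lo hi : Int),
    (hi - lo).toNat ≤ fuel + 1 → pvQ b f lo ≤ 0 → 0 < pvQ b f hi → lo < hi →
    0 < pvQ b f (pvBisect b f lo hi fuel) ∧ pvQ b f (pvBisect b f lo hi fuel - 1) ≤ 0 ∧
      lo < pvBisect b f lo hi fuel ∧ pvBisect b f lo hi fuel ≤ hi := by
  intro fuel
  induction fuel with
  | zero =>
      intro lo hi hfuel hlo hhi hlt
      rw [pvBisect]
      have hne : lo = hi - 1 := by omega
      exact ⟨hhi, by rw [← hne] at *; exact hlo, by omega, le_refl _⟩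
  | succ fuel ih =>
      intro lo hi hfuel hlo hhi hlt
      rw [pvBisect]
      by_cases hgt : hi - lo > 1
      · rw [if_pos hgt]
        have h1 : PySem.Int.floordiv (lo + hi) 2 * 2 + PySem.Int.mod (lo + hi) 2 = lo + hi :=
          PySem.Int.floordiv_mul_add_mod _ _
        have h2 := PySem.Int.mod_two_eq (lo + hi)
        by_cases hq : pvQ b f (PySem.Int.floordiv (lo + hi) 2) > 0
        · rw [if_pos hq]
          obtain ⟨r1, r2, r3, r4⟩ := ih lo (PySem.Int.floordiv (lo + hi) 2) (by omega) hlo hq (by omega)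
          exact ⟨r1, r2, r3, by omega⟩
        · rw [if_neg hq]
          obtain ⟨r1, r2, r3, r4⟩ := ih (PySem.Int.floordiv (lo + hi) 2) hi (by omega) (by omega) hhi (by omega)
          exact ⟨r1, r2, by omega, r4⟩
      · rw [if_neg hgt]
        have hne : lo = hi - 1 := by omega
        exact ⟨hhi, by rw [← hne] at *; exact hlo, by omega, le_refl _⟩

-- the search's upper bound always satisfies q > 0
theorem pvQ_big (b f : Int) : 0 < pvQ b f (2 * |b| + 2 * |f| + 2) := by
  unfold pvQ
  have h1 : b ≤ |b| := le_abs_self b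
  have h2 : -f ≤ |f| := neg_le_abs f
  have h3 : 0 ≤ |b| := abs_nonneg b
  have h4 : 0 ≤ |f| := abs_nonneg f
  nlinarith

-- ===== VERDICT (by name: the statement is the Claim_ definition above) =====
theorem how_many_uruks_spec : Claim_equal_how_many_uruks := by
  intro sv f _
  unfold Spec_how_many_uruks how_many_uruks how_many_uruks_alt
  rw [budget_eq]
  set b := pvBudgetB sv 0 with hb
  have hHnn : (0 : Int) ≤ 2 * |b| + 2 * |f| + 2 := by
    have := abs_nonneg b; have := abs_nonneg f; omega
  have hHcast : ((2 * |b| + 2 * |f| + 2).toNat : Int) = 2 * |b| + 2 * |f| + 2 := by omega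
  obtain ⟨hA0, hApos, hAlow⟩ :=
    loopA_char (2 * |b| + 2 * |f| + 2).toNat b f 0
      ⟨2 * |b| + 2 * |f| + 2, hHnn, by omega, pvQ_big b f⟩
  simp only [sub_zero] at hApos hAlow
  generalize hrA : pvLoopA b f 0 (2 * |b| + 2 * |f| + 2).toNat = rA at hA0 hApos hAlow ⊢
  by_cases h0 : pvQ b f 0 > 0
  · rw [if_pos h0]
    by_contra hne
    have hrpos : 0 < rA := by omega
    have := hAlow 0 le_rfl hrpos
    omega
  · rw [if_neg h0]
    replace h0 : pvQ b f 0 ≤ 0 := by omega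
    have hgap : ((2 * |b| + 2 * |f| + 2) - 0).toNat ≤ (2 * |b| + 2 * |f| + 2).toNat + 1 := by omega
    have hlt0 : (0 : Int) < 2 * |b| + 2 * |f| + 2 := by have := abs_nonneg b; have := abs_nonneg f; omega
    obtain ⟨hB1, hB2, hB3, _⟩ :=
      bisect_char b f (2 * |b| + 2 * |f| + 2).toNat 0 (2 * |b| + 2 * |f| + 2)
        hgap h0 (pvQ_big b f) hlt0
    generalize hrB : pvBisect b f 0 (2 * |b| + 2 * |f| + 2) (2 * |b| + 2 * |f| + 2).toNat = rB at hB1 hB2 hB3 ⊢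
    rcases lt_trichotomy rA rB with hlt | heq | hgt
    · have : pvQ b f rA ≤ 0 := pvQ_mono b f rA (rB - 1) (by omega) (by omega) h0 hB2
      omega
    · exact heq
    · have : pvQ b f rB ≤ 0 := hAlow rB (by omega) (by omega)
      omega
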